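-- pv_equiv track=rewrite | github.com/codybartfast/aoc-2017-py | day07.py | find_wrong_weight
-- ===== SOURCE A (Python) =====
-- def find_wrong_weight(name, progs, loads):
--     weight, subs = progs[name]
--     lds = [loads[sub] for sub in subs]
--     if len(set(lds)) == 1:
--         return weight
--     odd_weight = max(lds)
--     odd_name = subs[lds.index(odd_weight)]
--     return find_wrong_weight(odd_name, progs, loads)
-- ===== SOURCE B (Python) =====
-- def find_wrong_weight(name, progs, loads):
--     current = name
--     while True:
--         weight, subs = progs[current]
--         uniform = True
--         best_name = None
--         best_load = None
--         for sub in subs: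
--             ld = loads[sub]
--             if best_name is None:
--                 best_name, best_load = sub, ld
--             else:
--                 if ld != best_load:
--                     uniform = False
--                 if ld > best_load:
--                     best_name, best_load = sub, ld
--         if uniform:
--             return weight
--         current = best_name
-- ===== Notes on version B (the rewrite author's own statement) =====
-- stated objective: alternative
-- what changed: The recursive descent with four passes per level (list comprehension, set(), max(), list.index()) is replaced by an iterative while-loop that makes a single scan per level, tracking the running maximum child and a uniformity flag.
import Mathlib
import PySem

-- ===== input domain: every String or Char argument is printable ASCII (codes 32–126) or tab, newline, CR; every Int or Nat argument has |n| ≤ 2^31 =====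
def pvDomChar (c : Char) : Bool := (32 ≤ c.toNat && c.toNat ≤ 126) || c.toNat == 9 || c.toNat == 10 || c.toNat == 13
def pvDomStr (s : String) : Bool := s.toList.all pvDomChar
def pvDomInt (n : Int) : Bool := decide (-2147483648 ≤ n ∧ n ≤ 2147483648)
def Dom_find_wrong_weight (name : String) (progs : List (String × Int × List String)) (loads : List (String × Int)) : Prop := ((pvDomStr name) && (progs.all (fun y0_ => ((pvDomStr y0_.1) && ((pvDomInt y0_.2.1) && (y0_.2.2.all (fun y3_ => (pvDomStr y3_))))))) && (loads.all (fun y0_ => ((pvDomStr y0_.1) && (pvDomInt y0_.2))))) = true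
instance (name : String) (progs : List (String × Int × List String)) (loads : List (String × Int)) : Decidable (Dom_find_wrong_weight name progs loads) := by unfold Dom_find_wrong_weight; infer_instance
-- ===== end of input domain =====

-- B replaces A's recursion with four passes per level (comprehension, set(), max(), .index())
-- by an iterative loop making a single scan per level (running max child + uniformity flag); objective: alternative.

-- ===== PORT A =====
-- Python recursion ported with fuel (|progs| + 1; under Pre_ the descent visits distinct keys, so fuel never runs out);
-- branches returning 0 mark exactly the points where the Python raises (KeyError / ValueError) — outside Pre_.
def find_wrong_weight_go (dp : PySem.Dict String (Int × List String)) (dl : PySem.Dict String Int) : Nat → String → Int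
  | 0, _ => 0
  | fuel+1, name =>
    match PySem.Dict.get? dp name with
    | none => 0  -- KeyError: progs[name]
    | some (weight, subs) =>
      if subs.all (fun s => PySem.Dict.contains dl s) then
        let lds := subs.map (fun s => PySem.Dict.getD dl s 0)
        if (PySem.Set.ofList lds).length == 1 then weight
        else
          match PySem.List.max? lds (fun v => v) with
          | none => 0  -- ValueError: max([])
          | some m =>
            match PySem.List.index? lds m with
            | none => 0  -- unreachable (m ∈ lds)
            | some i =>
              match PySem.List.pyGet? subs (i : Int) with
              | none => 0  -- unreachable (i < len subs)
              | some odd => find_wrong_weight_go dp dl fuel odd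
      else 0  -- KeyError: loads[sub]

def find_wrong_weight (name : String) (progs : List (String × Int × List String)) (loads : List (String × Int)) : Int :=
  let dp := PySem.Dict.ofList progs
  let dl := PySem.Dict.ofList loads
  find_wrong_weight_go dp dl (dp.items.length + 1) name

-- ===== PORT B =====
-- one scan per level: state = (uniform flag, best (name, load) so far)
def altStep (dl : PySem.Dict String Int) (st : Bool × Option (String × Int)) (sub : String) : Bool × Option (String × Int) :=
  let ld := PySem.Dict.getD dl sub 0
  match st.2 with
  | none => (st.1, some (sub, ld))
  | some (bn, bl) =>
    let u := st.1 && (ld == bl)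
    if bl < ld then (u, some (sub, ld)) else (u, some (bn, bl))

def find_wrong_weight_alt_go (dp : PySem.Dict String (Int × List String)) (dl : PySem.Dict String Int) : Nat → String → Int
  | 0, _ => 0
  | fuel+1, current =>
    match PySem.Dict.get? dp current with
    | none => 0  -- KeyError: progs[current]
    | some (weight, subs) =>
      let st := subs.foldl (altStep dl) (true, none)
      if st.1 then weight
      else
        match st.2 with
        | none => 0  -- unreachable: st.2 = none forces st.1 = true
        | some (bn, _) => find_wrong_weight_alt_go dp dl fuel bn

def find_wrong_weight_alt (name : String) (progs : List (String × Int × List String)) (loads : List (String × Int)) : Int :=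
  let dp := PySem.Dict.ofList progs
  let dl := PySem.Dict.ofList loads
  find_wrong_weight_alt_go dp dl (dp.items.length + 1) name

-- ===== PRECONDITION & SPEC =====
def pvLoad (dl : PySem.Dict String Int) (s : String) : Int := PySem.Dict.getD dl s 0

-- the child an unbalanced node descends into: the first child of maximal load
def pvOddChild (dl : PySem.Dict String Int) (s0 : String) (rest : List String) : String :=
  let m := rest.foldl (fun a s => max a (pvLoad dl s)) (pvLoad dl s0)
  if pvLoad dl s0 = m then s0 else (rest.find? (fun s => pvLoad dl s == m)).getD s0

-- a node the descent can pass through without raising: a key of progs, nonempty children, all children in loads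
def pvNodeOK (dp : PySem.Dict String (Int × List String)) (dl : PySem.Dict String Int) (n : String) : Bool :=
  match PySem.Dict.get? dp n with
  | some (_, s0 :: rest) => (s0 :: rest).all (fun s => PySem.Dict.contains dl s)
  | _ => false

-- the descent edge: from an OK unbalanced node to its odd child (none at a balanced or ill-formed node)
def pvNext (dp : PySem.Dict String (Int × List String)) (dl : PySem.Dict String Int) (n : String) : Option String :=
  match PySem.Dict.get? dp n with
  | some (_, s0 :: rest) =>
    if (s0 :: rest).all (fun s => PySem.Dict.contains dl s) && !(rest.all (fun s => pvLoad dl s == pvLoad dl s0))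
    then some (pvOddChild dl s0 rest) else none
  | _ => none

-- the nodes the descent visits, starting at n (at most k edges)
def pvOrbit (dp : PySem.Dict String (Int × List String)) (dl : PySem.Dict String Int) : Nat → String → List String
  | 0, n => [n]
  | k+1, n => n :: (match pvNext dp dl n with | some m => pvOrbit dp dl k m | none => [])

-- Pre_ excludes exactly the inputs on which the Python A raises: it requires every node the
-- descent visits (the pvNext-orbit of name) to be a key of progs with nonempty children all
-- present in loads (else KeyError on progs[name]/loads[sub] or ValueError on max([])), and the
-- visited nodes to be pairwise distinct (a repeat makes the deterministic descent cycle forever: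
-- RecursionError). On every input where A returns normally both conditions hold.
def Pre_find_wrong_weight (name : String) (progs : List (String × Int × List String)) (loads : List (String × Int)) : Prop :=
  (∀ m ∈ pvOrbit (PySem.Dict.ofList progs) (PySem.Dict.ofList loads) ((PySem.Dict.ofList progs).items.length + 1) name,
     pvNodeOK (PySem.Dict.ofList progs) (PySem.Dict.ofList loads) m = true) ∧
  (pvOrbit (PySem.Dict.ofList progs) (PySem.Dict.ofList loads) ((PySem.Dict.ofList progs).items.length + 1) name).Nodup

instance (name : String) (progs : List (String × Int × List String)) (loads : List (String × Int)) : Decidable (Pre_find_wrong_weight name progs loads) := by unfold Pre_find_wrong_weight; infer_instance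

def pvWitness_find_wrong_weight : String × (List (String × Int × List String)) × (List (String × Int)) :=
  ("a", [("a", (1, ["b", "c"])), ("b", (4, ["d", "e"]))], [("b", (7 : Int)), ("c", 5), ("d", 2), ("e", 2)])

def Spec_find_wrong_weight (name : String) (progs : List (String × Int × List String)) (loads : List (String × Int)) (out : Int) : Prop := out = find_wrong_weight_alt name progs loads
instance (name : String) (progs : List (String × Int × List String)) (loads : List (String × Int)) (out : Int) : Decidable (Spec_find_wrong_weight name progs loads out) := by unfold Spec_find_wrong_weight; infer_instance

-- ===== CLAIM (what is proved, stated in full; the proofs are below) =====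
def Claim_equal_find_wrong_weight : Prop := ∀ (name : String) (progs : List (String × Int × List String)) (loads : List (String × Int)), Dom_find_wrong_weight name progs loads → Pre_find_wrong_weight name progs loads → Spec_find_wrong_weight name progs loads (find_wrong_weight name progs loads)

-- ===== LEMMAS AND PROOFS =====

theorem foldl_add_of_mem {α : Type} [BEq α] [LawfulBEq α] (t : List α) (s : PySem.Set α)
    (h : ∀ v ∈ t, v ∈ s) : t.foldl PySem.Set.add s = s := by
  induction t with
  | nil => rfl
  | cons y ys ih =>
    simp only [List.foldl_cons]
    rw [show PySem.Set.add s y = s from ?_]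
    · exact ih fun v hv => h v (List.mem_cons_of_mem _ hv)
    · simp [PySem.Set.add, PySem.Set.contains]
      exact h y (List.mem_cons_self)

theorem set_len_one (x : Int) (t : List Int) :
    ((PySem.Set.ofList (x :: t)).length == 1) = t.all (fun v => v == x) := by
  cases h : t.all (fun v => v == x) with
  | true =>
    have hall : ∀ v ∈ t, v = x := by simpa using h
    have : PySem.Set.ofList (x :: t) = [x] := by
      rw [PySem.Set.ofList_eq_foldl]
      simp only [List.foldl_cons]
      have : PySem.Set.add [] x = [x] := by simp [PySem.Set.add, PySem.Set.contains]
      rw [this]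
      exact foldl_add_of_mem t [x] (by intro v hv; simp [hall v hv])
    simp [this]
  | false =>
    have : ∃ v ∈ t, v ≠ x := by simpa using h
    obtain ⟨v, hv, hvx⟩ := this
    have hx : x ∈ PySem.Set.ofList (x :: t) := (PySem.Set.mem_ofList _ _).2 (List.mem_cons_self)
    have hv' : v ∈ PySem.Set.ofList (x :: t) := (PySem.Set.mem_ofList _ _).2 (List.mem_cons_of_mem _ hv)
    simp only [beq_eq_false_iff_ne]
    intro hlen
    obtain ⟨a, ha⟩ := List.length_eq_one_iff.1 hlen
    rw [ha] at hx hv'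
    simp at hx hv'
    exact hvx (hv'.trans hx.symm)

theorem altStep_some (dl : PySem.Dict String Int) (u : Bool) (bn : String) (bl : Int) (sub : String) :
    altStep dl (u, some (bn, bl)) sub =
      (u && (pvLoad dl sub == bl),
       some (if bl < pvLoad dl sub then (sub, pvLoad dl sub) else (bn, bl))) := by
  by_cases h : bl < PySem.Dict.getD dl sub 0 <;> simp [altStep, pvLoad, h]

theorem foldl_altStep_some (dl : PySem.Dict String Int) (t : List String) (u : Bool) (bn : String) (bl : Int) :
    t.foldl (altStep dl) (u, some (bn, bl)) =
      (u && t.all (fun s => pvLoad dl s == bl),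
       some (if bl < t.foldl (fun a s => max a (pvLoad dl s)) bl
             then ((t.find? (fun s => pvLoad dl s == t.foldl (fun a s => max a (pvLoad dl s)) bl)).getD bn,
                   t.foldl (fun a s => max a (pvLoad dl s)) bl)
             else (bn, bl))) := by
  induction t generalizing u bn bl with
  | nil => simp
  | cons y ys ih =>
    rw [List.foldl_cons, altStep_some, List.all_cons]
    by_cases hlt : bl < pvLoad dl y
    · rw [if_pos hlt, ih]
      have hne : (pvLoad dl y == bl) = false := by simp; omega
      have hmax : max bl (pvLoad dl y) = pvLoad dl y := by omega
      rw [hne]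
      simp only [Bool.and_false, Bool.false_and, Bool.false_and]
      rw [show ((y :: ys).foldl (fun a s => max a (pvLoad dl s)) bl) = ys.foldl (fun a s => max a (pvLoad dl s)) (pvLoad dl y) by rw [List.foldl_cons, hmax]]
      set m := ys.foldl (fun a s => max a (pvLoad dl s)) (pvLoad dl y) with hm
      have hym : pvLoad dl y ≤ m := (PySem.List.le_foldl_max_int ys (pvLoad dl) (pvLoad dl y)).1
      have hblm : bl < m := lt_of_lt_of_le hlt hym
      rw [if_pos hblm, List.find?_cons]
      congr 1
      by_cases hy : pvLoad dl y = m
      · rw [if_neg (by omega : ¬ pvLoad dl y < m)]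
        simp [hy]
      · have hylt : pvLoad dl y < m := lt_of_le_of_ne hym hy
        rw [if_pos hylt]
        rw [show (pvLoad dl y == m) = false by simp [hy]]
        have hmem : ∃ s ∈ ys, pvLoad dl s = m := by
          have h2 := PySem.List.foldl_max_mem (ys.map (pvLoad dl)) (pvLoad dl y)
          rw [List.foldl_map, ← hm] at h2
          rcases h2 with h2 | h2
          · omega
          · obtain ⟨s, hs, hsv⟩ := List.mem_map.1 h2; exact ⟨s, hs, hsv⟩
        obtain ⟨s, hs, hsv⟩ := hmem
        have : ∃ r, ys.find? (fun s => pvLoad dl s == m) = some r := by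
          have : (ys.find? (fun s => pvLoad dl s == m)).isSome := by
            rw [List.find?_isSome]
            exact ⟨s, hs, by simp [hsv]⟩
          exact Option.isSome_iff_exists.1 this
        obtain ⟨r, hr⟩ := this
        simp [hr]
    · rw [if_neg hlt, ih]
      have hmax : max bl (pvLoad dl y) = bl := by omega
      rw [show ((y :: ys).foldl (fun a s => max a (pvLoad dl s)) bl) = ys.foldl (fun a s => max a (pvLoad dl s)) bl by rw [List.foldl_cons, hmax]]
      set m := ys.foldl (fun a s => max a (pvLoad dl s)) bl with hm
      congr 1
      · rw [Bool.and_assoc]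
      · by_cases hM : bl < m
        · rw [if_pos hM, if_pos hM, List.find?_cons]
          rw [show (pvLoad dl y == m) = false by simp; omega]
        · rw [if_neg hM, if_neg hM]

theorem index_chain (dl : PySem.Dict String Int) (l : List String) (m : Int) (hm : ∃ s ∈ l, pvLoad dl s = m) :
    ∃ j, PySem.List.index? (l.map (pvLoad dl)) m = some j ∧
      PySem.List.pyGet? l (j : Int) = l.find? (fun s => pvLoad dl s == m) := by
  induction l with
  | nil => simp at hm
  | cons y ys ih =>
    by_cases hy : pvLoad dl y = m
    · refine ⟨0, ?_, ?_⟩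
      · rw [List.map_cons, hy]
        exact PySem.List.index?_cons_self m (ys.map (pvLoad dl))
      · rw [List.find?_cons, show (pvLoad dl y == m) = true by simp [hy]]
        rw [show ((0 : Nat) : Int) = ((0 : Nat) : Int) from rfl, PySem.List.pyGet?_natCast]
        rfl
    · have hm' : ∃ s ∈ ys, pvLoad dl s = m := by
        rcases hm with ⟨s, hs, hsv⟩
        rcases List.mem_cons.1 hs with h | h
        · exact absurd (h ▸ hsv) hy
        · exact ⟨s, h, hsv⟩
      obtain ⟨j, hj, hg⟩ := ih hm'
      refine ⟨j + 1, ?_, ?_⟩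
      · rw [List.map_cons, PySem.List.index?_cons_of_ne _ hy, hj]; rfl
      · rw [List.find?_cons, show (pvLoad dl y == m) = false by simp [hy]]
        rw [PySem.List.pyGet?_natCast] at hg ⊢
        simpa using hg

-- the two ports step in lockstep: on every node of the orbit that is OK they take the same
-- branch and descend to the same child, and at fuel 0 both return 0
theorem go_eq (dp : PySem.Dict String (Int × List String)) (dl : PySem.Dict String Int) :
    ∀ fuel n, (∀ m ∈ pvOrbit dp dl fuel n, pvNodeOK dp dl m = true) →
      find_wrong_weight_go dp dl fuel n = find_wrong_weight_alt_go dp dl fuel n := by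
  intro fuel
  induction fuel with
  | zero => intro n _; rfl
  | succ fuel ih =>
    intro n hok
    have hn : pvNodeOK dp dl n = true := hok n (by simp [pvOrbit])
    unfold pvNodeOK at hn
    cases hdn : PySem.Dict.get? dp n with
    | none => rw [hdn] at hn; simp at hn
    | some p =>
      obtain ⟨w, subs⟩ := p
      rw [hdn] at hn
      cases subs with
      | nil => simp at hn
      | cons s0 rest =>
        have hcont : ((s0 :: rest).all (fun s => PySem.Dict.contains dl s)) = true := hn
        simp only [find_wrong_weight_go, find_wrong_weight_alt_go, hdn]
        rw [if_pos hcont]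
        have hfl : (fun s => PySem.Dict.getD dl s 0) = pvLoad dl := rfl
        rw [hfl]
        rw [show ((s0 :: rest).foldl (altStep dl) (true, none)) = rest.foldl (altStep dl) (true, some (s0, pvLoad dl s0)) from rfl]
        rw [foldl_altStep_some]
        simp only [Bool.true_and]
        rw [List.map_cons, set_len_one]
        rw [show ((rest.map (pvLoad dl)).all (fun v => v == pvLoad dl s0)) = rest.all (fun s => pvLoad dl s == pvLoad dl s0) by rw [List.all_map]; rfl]
        by_cases hb : rest.all (fun s => pvLoad dl s == pvLoad dl s0)
        · rw [hb]; simp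
        · rw [eq_false_of_ne_true hb]
          simp only [Bool.false_eq_true, if_false]
          set M := rest.foldl (fun a s => max a (pvLoad dl s)) (pvLoad dl s0) with hM
          have hle : pvLoad dl s0 ≤ M := (PySem.List.le_foldl_max_int rest (pvLoad dl) (pvLoad dl s0)).1
          have hmaxeq : (PySem.List.max? (pvLoad dl s0 :: rest.map (pvLoad dl)) (fun v => v)) = some M := by
            rw [PySem.List.max?_id_cons, List.foldl_map]
          simp only [hmaxeq]
          have hmem : ∃ s ∈ s0 :: rest, pvLoad dl s = M := by
            have h2 := PySem.List.foldl_max_mem (rest.map (pvLoad dl)) (pvLoad dl s0)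
            rw [List.foldl_map, ← hM] at h2
            rcases h2 with h2 | h2
            · exact ⟨s0, List.mem_cons_self, h2.symm⟩
            · obtain ⟨s, hs, hsv⟩ := List.mem_map.1 h2
              exact ⟨s, List.mem_cons_of_mem _ hs, hsv⟩
          obtain ⟨j, hj, hg⟩ := index_chain dl (s0 :: rest) M hmem
          rw [List.map_cons] at hj
          simp only [hj]
          have hodd : (s0 :: rest).find? (fun s => pvLoad dl s == M) = some (pvOddChild dl s0 rest) := by
            unfold pvOddChild
            simp only [← hM]
            rw [List.find?_cons]
            by_cases h0 : pvLoad dl s0 = M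
            · rw [show (pvLoad dl s0 == M) = true by simp [h0], if_pos h0]
            · rw [show (pvLoad dl s0 == M) = false by simp [h0]]
              rw [if_neg h0]
              have : ∃ s ∈ rest, pvLoad dl s = M := by
                rcases hmem with ⟨s, hs, hsv⟩
                rcases List.mem_cons.1 hs with h | h
                · exact absurd (h ▸ hsv) h0
                · exact ⟨s, h, hsv⟩
              obtain ⟨s, hs, hsv⟩ := this
              have hsome : (rest.find? (fun s => pvLoad dl s == M)).isSome := by
                rw [List.find?_isSome]; exact ⟨s, hs, by simp [hsv]⟩
              obtain ⟨r, hr⟩ := Option.isSome_iff_exists.1 hsome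
              simp [hr]
          simp only [hg, hodd]
          have hbB : (if pvLoad dl s0 < M
                      then ((rest.find? (fun s => pvLoad dl s == M)).getD s0, M)
                      else (s0, pvLoad dl s0)).1 = pvOddChild dl s0 rest := by
            unfold pvOddChild
            simp only [← hM]
            by_cases h0 : pvLoad dl s0 = M
            · rw [if_neg (by omega), if_pos h0]
            · rw [if_pos (lt_of_le_of_ne hle h0), if_neg h0]
          rw [show (if pvLoad dl s0 < M
                      then ((rest.find? (fun s => pvLoad dl s == M)).getD s0, M)
                      else (s0, pvLoad dl s0)) = (pvOddChild dl s0 rest, (if pvLoad dl s0 < M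
                      then ((rest.find? (fun s => pvLoad dl s == M)).getD s0, M)
                      else (s0, pvLoad dl s0)).2) from ?_]
          · -- both recurse on pvOddChild; the orbit hypothesis descends with them
            have hnext : pvNext dp dl n = some (pvOddChild dl s0 rest) := by
              simp [pvNext, hdn, hcont, eq_false_of_ne_true hb]
            refine ih (pvOddChild dl s0 rest) ?_
            intro m hm
            refine hok m ?_
            simp only [pvOrbit, hnext]
            exact List.mem_cons_of_mem _ hm
          · rw [← hbB]

-- ===== VERDICT (by name: the statement is the Claim_ definition above) =====
theorem find_wrong_weight_spec : Claim_equal_find_wrong_weight := by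
  intro name progs loads _hdom hpre
  unfold Spec_find_wrong_weight find_wrong_weight find_wrong_weight_alt
  exact go_eq _ _ _ name hpre.1
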